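-- pv_equiv track=rewrite | github.com/shenranwang/mgeval | mgeval/utils.py | count_n_consecutive_values
-- ===== SOURCE A (Python) =====
-- def count_n_consecutive_values(arr, n):
--     if n <= 1:
--         return len(arr) - 1
--     count = 0
--     consecutive_count = 1  # Start count at 1 for the first element
--     for i in range(1, len(arr)):
--         if arr[i] == arr[i - 1]:
--             consecutive_count += 1
--             if consecutive_count == n:
--                 count += 1
--         else:
--             consecutive_count = 1
--     return count
-- ===== SOURCE B (Python) =====
-- def count_n_consecutive_values(arr, n):
--     if n <= 1:
--         return len(arr) - 1
--     count = 0
--     i = 0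
--     while i < len(arr):
--         j = i
--         while j < len(arr) and arr[j] == arr[i]:
--             j += 1
--         if j - i >= n:
--             count += 1
--         i = j
--     return count
-- ===== Notes on version B (the rewrite author's own statement) =====
-- stated objective: alternative
-- what changed: Replaces the per-element running-counter-with-reset loop (counting each time the counter hits exactly n) by a two-pointer run segmentation: an inner scan finds the end of each maximal run of equal values and a run is counted once if its length is >= n.
import Mathlib
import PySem

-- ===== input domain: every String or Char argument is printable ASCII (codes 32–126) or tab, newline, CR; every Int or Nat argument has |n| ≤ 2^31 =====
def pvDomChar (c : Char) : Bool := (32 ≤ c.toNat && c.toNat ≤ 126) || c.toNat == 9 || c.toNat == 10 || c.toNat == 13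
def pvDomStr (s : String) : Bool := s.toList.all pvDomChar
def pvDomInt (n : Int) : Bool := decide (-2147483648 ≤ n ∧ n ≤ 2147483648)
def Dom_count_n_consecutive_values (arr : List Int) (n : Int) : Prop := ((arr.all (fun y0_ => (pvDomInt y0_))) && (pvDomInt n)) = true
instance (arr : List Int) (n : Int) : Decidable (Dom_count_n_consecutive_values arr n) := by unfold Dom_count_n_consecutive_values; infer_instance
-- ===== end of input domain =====

-- B replaces A's running-counter-with-reset loop by a two-pointer maximal-run
-- segmentation counting runs of length ≥ n (alternative decomposition, same cost).

-- ===== PORT A =====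
-- the loop 'for i in range(1, len(arr))' comparing arr[i] with arr[i-1],
-- transcribed as structural recursion over the tail carrying the previous element
def aLoop (prev : Int) (xs : List Int) (count cc n : Int) : Int :=
  match xs with
  | [] => count
  | x :: rest =>
    if x = prev then
      if cc + 1 = n then aLoop x rest (count + 1) (cc + 1) n
      else aLoop x rest count (cc + 1) n
    else aLoop x rest count 1 n

def count_n_consecutive_values (arr : List Int) (n : Int) : Int :=
  if n ≤ 1 then (arr.length : Int) - 1
  else
    match arr with
    | [] => 0
    | x :: rest => aLoop x rest 0 1 n

-- ===== PORT B =====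
-- termination helpers for the index while-loops of Source B
theorem bInner_aux (arr : List Int) (v : Int) (j : Nat)
    (h : j < arr.length ∧ arr.getD j 0 = v) :
    arr.length - (j + 1) < arr.length - j := by omega

-- inner while loop: 'while j < len(arr) and arr[j] == arr[i]: j += 1'
def bInner (arr : List Int) (v : Int) (j : Nat) : Nat :=
  if h : j < arr.length ∧ arr.getD j 0 = v then bInner arr v (j + 1) else j
termination_by arr.length - j
decreasing_by exact bInner_aux arr v j h

theorem bInner_ge (arr : List Int) (v : Int) : ∀ j, j ≤ bInner arr v j := by
  intro j
  induction j using bInner.induct arr v with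
  | case1 j h ih => rw [bInner, dif_pos h]; omega
  | case2 j h => rw [bInner, dif_neg h]

theorem bInner_lt (arr : List Int) (i : Nat) (h : i < arr.length) :
    i < bInner arr (arr.getD i 0) i := by
  rw [bInner, dif_pos ⟨h, rfl⟩]
  have := bInner_ge arr (arr.getD i 0) (i + 1)
  omega

-- outer while loop: 'while i < len(arr): …'
def bOuter (arr : List Int) (n : Int) (i : Nat) (count : Int) : Int :=
  if h : i < arr.length then
    let j := bInner arr (arr.getD i 0) i
    bOuter arr n j (if n ≤ (j : Int) - (i : Int) then count + 1 else count)
  else count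
termination_by arr.length - i
decreasing_by have := bInner_lt arr i h; omega

def count_n_consecutive_values_alt (arr : List Int) (n : Int) : Int :=
  if n ≤ 1 then (arr.length : Int) - 1
  else bOuter arr n 0 0

-- ===== PRECONDITION & SPEC =====
def Spec_count_n_consecutive_values (arr : List Int) (n : Int) (out : Int) : Prop := out = count_n_consecutive_values_alt arr n
instance (arr : List Int) (n : Int) (out : Int) : Decidable (Spec_count_n_consecutive_values arr n out) := by unfold Spec_count_n_consecutive_values; infer_instance

-- ===== CLAIM (what is proved, stated in full; the proofs are below) =====
def Claim_equal_count_n_consecutive_values : Prop := ∀ (arr : List Int) (n : Int), Dom_count_n_consecutive_values arr n → Spec_count_n_consecutive_values arr n (count_n_consecutive_values arr n)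

-- ===== LEMMAS AND PROOFS =====

-- run lengths of a list (lengths of maximal blocks of equal consecutive values)
def runGo (v c : Int) : List Int → List Int
  | [] => [c]
  | y :: ys => if y = v then runGo v (c + 1) ys else c :: runGo y 1 ys

def runLens : List Int → List Int
  | [] => []
  | x :: xs => runGo x 1 xs

-- count of run lengths ≥ n
def cntGE (n : Int) (l : List Int) : Int :=
  ((l.filter (fun L => decide (n ≤ L))).length : Int)

theorem cntGE_cons (n c : Int) (l : List Int) :
    cntGE n (c :: l) = (if n ≤ c then 1 else 0) + cntGE n l := by
  by_cases h : n ≤ c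
  · simp [cntGE, h]
    omega
  · simp [cntGE, h]

-- A-side invariant: aLoop counts, among the runs seen from 'prev' onwards
-- (the current run already having length cc), those of total length ≥ n;
-- minus 1 if the current run was already counted (cc ≥ n).
theorem aLoop_eq (n : Int) (hn : ¬ n ≤ 1) :
    ∀ (xs : List Int) (prev count cc : Int),
      aLoop prev xs count cc n =
        count + cntGE n (runGo prev cc xs) - (if cc < n then 0 else 1) := by
  intro xs
  induction xs with
  | nil =>
    intro prev count cc
    have h0 : cntGE n ([] : List Int) = 0 := by simp [cntGE]
    simp only [aLoop, runGo, cntGE_cons, h0]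
    split_ifs <;> omega
  | cons x rest ih =>
    intro prev count cc
    simp only [aLoop, runGo]
    by_cases hx : x = prev
    · simp only [if_pos hx]
      by_cases hcc : cc + 1 = n
      · rw [if_pos hcc, ih, hx]
        have : ¬ (cc + 1 < n) := by omega
        rw [if_neg this, if_pos (by omega : cc < n)]
        omega
      · rw [if_neg hcc, ih, hx]
        have : (cc + 1 < n) ↔ (cc < n) := by omega
        rcases (by omega : cc < n ∨ ¬ cc < n) with h | h
        · rw [if_pos (by omega : cc + 1 < n), if_pos h]
        · rw [if_neg (by omega : ¬ cc + 1 < n), if_neg h]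
    · simp only [if_neg hx, ih, cntGE_cons]
      rcases (by omega : cc < n ∨ ¬ cc < n) with h | h
      · rw [if_pos h, if_pos (by omega : 1 < n), if_neg (by omega : ¬ n ≤ cc)]
        omega
      · rw [if_neg h, if_pos (by omega : 1 < n), if_pos (by omega : n ≤ cc)]
        omega

-- bInner finds the end of the maximal run of v starting at j
theorem bInner_props (arr : List Int) (v : Int) :
    ∀ j, j ≤ arr.length →
      bInner arr v j ≤ arr.length ∧
      arr.drop j = List.replicate (bInner arr v j - j) v ++ arr.drop (bInner arr v j) ∧
      (bInner arr v j < arr.length → arr.getD (bInner arr v j) 0 ≠ v) := by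
  intro j
  induction j using bInner.induct arr v with
  | case1 j h ih =>
    intro _
    rw [bInner, dif_pos h]
    obtain ⟨h1, h2, h3⟩ := ih (by omega)
    refine ⟨h1, ?_, h3⟩
    have hj1 := bInner_ge arr v (j + 1)
    have hget : arr.drop j = v :: arr.drop (j + 1) := by
      rw [List.drop_eq_getElem_cons h.1]
      have : arr[j] = v := by
        have := h.2; rwa [List.getD_eq_getElem arr 0 h.1] at this
      rw [this]
    rw [hget, h2]
    have : bInner arr v (j + 1) - j = (bInner arr v (j + 1) - (j + 1)) + 1 := by omega
    rw [this, List.replicate_succ]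
    simp
  | case2 j h =>
    intro hj
    rw [bInner, dif_neg h]
    exact ⟨hj, by simp, fun hlt hv => h ⟨hlt, hv⟩⟩

theorem runGo_replicate (v : Int) (m : Nat) :
    ∀ (c : Int) (rest : List Int),
      runGo v c (List.replicate m v ++ rest) = runGo v (c + m) rest := by
  induction m with
  | zero => intro c rest; simp
  | succ k ih =>
    intro c rest
    rw [List.replicate_succ, List.cons_append]
    simp only [runGo]
    rw [ih]
    have hc : c + 1 + (k : Int) = c + ((k + 1 : Nat) : Int) := by push_cast; ring
    rw [hc]
    simp

theorem runGo_boundary (v c : Int) (rest : List Int)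
    (h : ∀ y ys, rest = y :: ys → y ≠ v) :
    runGo v c rest = c :: runLens rest := by
  cases rest with
  | nil => simp [runGo, runLens]
  | cons y ys =>
    simp only [runGo, runLens, if_neg (h y ys rfl)]

-- B-side invariant
theorem bOuter_eq (arr : List Int) (n : Int) :
    ∀ i count, bOuter arr n i count = count + cntGE n (runLens (arr.drop i)) := by
  intro i count
  induction i, count using bOuter.induct arr n with
  | case1 i count h j ih =>
    rw [dite_eq_ite] at ih
    rw [bOuter, dif_pos h]
    show bOuter arr n j (if n ≤ (j : Int) - (i : Int) then count + 1 else count)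
        = count + cntGE n (runLens (List.drop i arr))
    rw [ih]
    obtain ⟨hle, hdrop, hbound⟩ := bInner_props arr (arr.getD i 0) i (by omega)
    have hij : i < j := bInner_lt arr i h
    have hdi : arr.drop i = List.replicate (j - i) (arr.getD i 0) ++ arr.drop j := hdrop
    have hhead : ∀ y ys, arr.drop j = y :: ys → y ≠ arr.getD i 0 := by
      intro y ys hyys hy
      have hjl : j < arr.length := by
        by_contra hc
        rw [List.drop_eq_nil_of_le (by omega)] at hyys
        simp at hyys
      have h1 : (List.drop j arr).head? = some y := by rw [hyys]; rfl
      rw [List.head?_drop] at h1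
      have h2 : arr.getD j 0 = y := by rw [List.getD_eq_getElem?_getD, h1]; rfl
      exact hbound hjl (by rw [h2, hy])
    have hrl : runLens (arr.drop i) = ((j : Int) - (i : Int)) :: runLens (arr.drop j) := by
      rw [hdi]
      have hm : j - i = (j - i - 1) + 1 := by omega
      rw [hm, List.replicate_succ, List.cons_append]
      show runGo _ 1 _ = _
      rw [runGo_replicate, runGo_boundary _ _ _ hhead]
      congr 1
      omega
    rw [hrl, cntGE_cons]
    split_ifs <;> omega
  | case2 i count h =>
    rw [bOuter, dif_neg h]
    rw [List.drop_eq_nil_of_le (by omega)]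
    simp [runLens, cntGE]

-- ===== VERDICT (by name: the statement is the Claim_ definition above) =====
theorem count_n_consecutive_values_spec : Claim_equal_count_n_consecutive_values := by
  intro arr n _
  unfold Spec_count_n_consecutive_values count_n_consecutive_values count_n_consecutive_values_alt
  by_cases hn : n ≤ 1
  · rw [if_pos hn, if_pos hn]
  · rw [if_neg hn, if_neg hn, bOuter_eq]
    cases arr with
    | nil => simp [runLens, cntGE]
    | cons x rest =>
      show aLoop x rest 0 1 n = 0 + cntGE n (runLens (List.drop 0 (x :: rest)))
      rw [aLoop_eq n hn, if_pos (by omega : (1 : Int) < n)]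
      simp [runLens]
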